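-- pv_equiv track=rewrite | github.com/EthShaw/AdventOfCode2024 | day7/main.py | getEqnValue2
-- ===== SOURCE A (Python) =====
-- def concat(a, b):
--     tempB = b
--     while tempB > 0:
--         tempB = tempB // 10
--         a *= 10
--     return a + b
--
-- def getEqnValue2(coefs, resVal, runningSum=None):
--     if len(coefs) == 0:
--         yield runningSum
--         return
--     if runningSum is None:
--         yield from getEqnValue2(coefs[1:], resVal, coefs[0])
--         return
--     if runningSum > resVal:
--         # Prune this branch because it already failed
--         yield runningSum
--         return
--
--     yield from getEqnValue2(coefs[1:], resVal, coefs[0] * runningSum)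
--     yield from getEqnValue2(coefs[1:], resVal, coefs[0] + runningSum)
--     yield from getEqnValue2(coefs[1:], resVal, concat(runningSum, coefs[0]))
-- ===== SOURCE B (Python) =====
-- def concat(a, b):
--     tempB = b
--     while tempB > 0:
--         tempB = tempB // 10
--         a *= 10
--     return a + b
--
-- def getEqnValue2(coefs, resVal, runningSum=None):
--     # Iterative version: explicit LIFO stack of (coefs, runningSum) states,
--     # children pushed in reverse so the multiply branch is expanded first.
--     stack = [(coefs, runningSum)]
--     while stack:
--         cs, rs = stack.pop()
--         if not cs:
--             yield rs
--         elif rs is None: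
--             stack.append((cs[1:], cs[0]))
--         elif rs > resVal:
--             yield rs
--         else:
--             c, rest = cs[0], cs[1:]
--             stack.append((rest, concat(rs, c)))
--             stack.append((rest, c + rs))
--             stack.append((rest, c * rs))
-- ===== Notes on version B (the rewrite author's own statement) =====
-- stated objective: alternative
-- what changed: The recursive generator (three recursive yield-from calls) is replaced by an iterative loop over an explicit LIFO stack of (coefs, runningSum) states, pushing the three children in reverse to preserve the yield order.
-- outside the precondition, e.g. on getEqnValue2([], 0, None): A returns [None], B returns [None]
import Mathlib
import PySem

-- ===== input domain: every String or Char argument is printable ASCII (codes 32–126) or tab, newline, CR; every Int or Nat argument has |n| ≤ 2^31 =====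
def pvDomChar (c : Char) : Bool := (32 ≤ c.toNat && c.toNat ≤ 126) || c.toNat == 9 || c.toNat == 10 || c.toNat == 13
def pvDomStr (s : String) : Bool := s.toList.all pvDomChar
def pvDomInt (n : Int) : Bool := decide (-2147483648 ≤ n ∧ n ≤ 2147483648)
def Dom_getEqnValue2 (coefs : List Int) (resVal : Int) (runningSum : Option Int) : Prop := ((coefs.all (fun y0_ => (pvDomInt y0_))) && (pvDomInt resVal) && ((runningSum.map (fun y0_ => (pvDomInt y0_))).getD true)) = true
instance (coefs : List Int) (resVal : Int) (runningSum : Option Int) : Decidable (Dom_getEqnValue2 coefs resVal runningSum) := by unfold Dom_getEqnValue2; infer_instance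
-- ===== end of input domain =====

-- B replaces A's recursive generator by an iterative loop over an explicit LIFO stack
-- of (coefs, runningSum) states (objective: alternative decomposition, same cost).


-- ===== PORT A =====
-- concat's while loop: tempB = tempB // 10; a *= 10 while tempB > 0
def concatLoop (tempB a : Int) : Int :=
  if h : tempB > 0 then concatLoop (PySem.Int.floordiv tempB 10) (a * 10) else a
termination_by tempB.toNat
decreasing_by
  have he : tempB.fdiv 10 = tempB / 10 := Int.fdiv_eq_ediv_of_nonneg _ (by omega)
  simp [PySem.Int.floordiv, he]
  omega

def pyConcat (a b : Int) : Int := concatLoop b a + b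

def getEqnValue2 (coefs : List Int) (resVal : Int) (runningSum : Option Int) : List Int :=
  match coefs, runningSum with
  | [], some r => [r]                 -- yield runningSum
  | [], none => []                    -- Python yields None here (excluded by Pre_)
  | c :: rest, none => getEqnValue2 rest resVal (some c)
  | c :: rest, some r =>
    if r > resVal then [r]            -- prune: yield and stop
    else getEqnValue2 rest resVal (some (c * r))
      ++ getEqnValue2 rest resVal (some (c + r))
      ++ getEqnValue2 rest resVal (some (pyConcat r c))

-- ===== PORT B =====
-- stack-entry weight used as the termination measure of the loop
def stackWt (s : List (List Int × Option Int)) : Nat :=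
  (s.map (fun e => 4 ^ (e.1.length + 1))).sum

-- the while loop: pop a state, yield or push children (multiply popped first)
def loopB (resVal : Int) (stack : List (List Int × Option Int)) : List Int :=
  match stack with
  | [] => []
  | ([], some r) :: s => r :: loopB resVal s       -- yield rs
  | ([], none) :: s => loopB resVal s              -- Python yields None here (excluded by Pre_)
  | (c :: rest, none) :: s => loopB resVal ((rest, some c) :: s)
  | (c :: rest, some r) :: s =>
    if r > resVal then r :: loopB resVal s
    else loopB resVal ((rest, some (c * r)) :: (rest, some (c + r)) :: (rest, some (pyConcat r c)) :: s)
termination_by stackWt stack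
decreasing_by
  all_goals simp [stackWt, pow_succ]
  all_goals try omega
  all_goals (have hp : 0 < 4 ^ rest.length := Nat.pow_pos (by norm_num); omega)

def getEqnValue2_alt (coefs : List Int) (resVal : Int) (runningSum : Option Int) : List Int :=
  loopB resVal [(coefs, runningSum)]

-- ===== PRECONDITION & SPEC =====
-- Pre_ excludes only (coefs = [], runningSum = None), where A yields None, a value
-- outside the declared List Int result type.
def Pre_getEqnValue2 (coefs : List Int) (resVal : Int) (runningSum : Option Int) : Prop :=
  coefs ≠ [] ∨ runningSum ≠ none
instance (coefs : List Int) (resVal : Int) (runningSum : Option Int) : Decidable (Pre_getEqnValue2 coefs resVal runningSum) := by unfold Pre_getEqnValue2; infer_instance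
def pvWitness_getEqnValue2 : List Int × Int × Option Int := ([2, 3], 6, none)

def Spec_getEqnValue2 (coefs : List Int) (resVal : Int) (runningSum : Option Int) (out : List Int) : Prop := out = getEqnValue2_alt coefs resVal runningSum
instance (coefs : List Int) (resVal : Int) (runningSum : Option Int) (out : List Int) : Decidable (Spec_getEqnValue2 coefs resVal runningSum out) := by unfold Spec_getEqnValue2; infer_instance

-- ===== CLAIM (what is proved, stated in full; the proofs are below) =====
def Claim_equal_getEqnValue2 : Prop := ∀ (coefs : List Int) (resVal : Int) (runningSum : Option Int), Dom_getEqnValue2 coefs resVal runningSum → Pre_getEqnValue2 coefs resVal runningSum → Spec_getEqnValue2 coefs resVal runningSum (getEqnValue2 coefs resVal runningSum)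

-- ===== LEMMAS AND PROOFS =====
-- processing the top stack entry produces exactly A's output for it, then the rest
theorem loopB_split (cs : List Int) (resVal : Int) (rs : Option Int)
    (s : List (List Int × Option Int)) :
    loopB resVal ((cs, rs) :: s) = getEqnValue2 cs resVal rs ++ loopB resVal s := by
  induction cs generalizing rs s with
  | nil => cases rs <;> (rw [loopB.eq_def]; simp [getEqnValue2])
  | cons c rest ih =>
    cases rs with
    | none => rw [loopB.eq_def]; simp [getEqnValue2, ih]
    | some r =>
      by_cases h : r > resVal
      · rw [loopB.eq_def]; simp [getEqnValue2, h]
      · rw [loopB.eq_def]; simp [getEqnValue2, h, ih]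

-- ===== VERDICT (by name: the statement is the Claim_ definition above) =====
theorem getEqnValue2_spec : Claim_equal_getEqnValue2 := by
  intro coefs resVal runningSum _ _
  unfold Spec_getEqnValue2 getEqnValue2_alt
  rw [loopB_split, loopB.eq_def]
  simp
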